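-- pv_equiv track=rewrite | github.com/LiXianyao/jointEE-zh | token_average_softmax/network/models/ArgumentRoleClsBaseLayer.py | trigger_entity_combi
-- ===== SOURCE A (Python) =====
-- def trigger_entity_combi(trigger_type_list, trigger_type_emb, entity_type_list, entity_type_emb):
--     def no_duplicate_emb(type_list, type_emb):
--         res_type, res_emb = [], []
--         for idx in range(len(type_list)):
--             if type_list[idx] in type_list[idx + 1:]:
--                 continue
--             res_emb.append(type_emb[idx])
--             res_type.append(type_list[idx])
--         return res_type, res_emb
--     trigger_type, trigger_emb = no_duplicate_emb(trigger_type_list, trigger_type_emb)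
--     entity_type, entity_emb = no_duplicate_emb(entity_type_list, entity_type_emb)
--
--     type_cat = [(t_type, e_type) for e_type in entity_type for t_type in trigger_type]
--     emb_cat = [(t_emb, e_emb) for e_emb in entity_emb for t_emb in trigger_emb]
--     return type_cat, emb_cat
-- ===== SOURCE B (Python) =====
-- def trigger_entity_combi(trigger_type_list, trigger_type_emb, entity_type_list, entity_type_emb):
--     def dedup_last(type_list, type_emb):
--         seen = set()
--         pairs = []
--         for p in reversed(list(zip(type_list, type_emb))):
--             if p[0] not in seen:
--                 seen.add(p[0])
--                 pairs.append(p)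
--         pairs.reverse()
--         return pairs
--     trig = dedup_last(trigger_type_list, trigger_type_emb)
--     ent = dedup_last(entity_type_list, entity_type_emb)
--     type_cat, emb_cat = [], []
--     for e_t, e_e in ent:
--         for t_t, t_e in trig:
--             type_cat.append((t_t, e_t))
--             emb_cat.append((t_e, e_e))
--     return type_cat, emb_cat
-- ===== Notes on version B (the rewrite author's own statement) =====
-- stated objective: alternative
-- what changed: Dedup becomes one backward pass over the zipped (type, emb) pairs with a seen-set (keeping each type's last occurrence and dropping the original's per-index tail scan over two parallel lists), and both cartesian products are built together in one fused double loop over the pair lists instead of two separate comprehensions; overall runtime is dominated by the product, so the measured cost is the same.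
import Mathlib
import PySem

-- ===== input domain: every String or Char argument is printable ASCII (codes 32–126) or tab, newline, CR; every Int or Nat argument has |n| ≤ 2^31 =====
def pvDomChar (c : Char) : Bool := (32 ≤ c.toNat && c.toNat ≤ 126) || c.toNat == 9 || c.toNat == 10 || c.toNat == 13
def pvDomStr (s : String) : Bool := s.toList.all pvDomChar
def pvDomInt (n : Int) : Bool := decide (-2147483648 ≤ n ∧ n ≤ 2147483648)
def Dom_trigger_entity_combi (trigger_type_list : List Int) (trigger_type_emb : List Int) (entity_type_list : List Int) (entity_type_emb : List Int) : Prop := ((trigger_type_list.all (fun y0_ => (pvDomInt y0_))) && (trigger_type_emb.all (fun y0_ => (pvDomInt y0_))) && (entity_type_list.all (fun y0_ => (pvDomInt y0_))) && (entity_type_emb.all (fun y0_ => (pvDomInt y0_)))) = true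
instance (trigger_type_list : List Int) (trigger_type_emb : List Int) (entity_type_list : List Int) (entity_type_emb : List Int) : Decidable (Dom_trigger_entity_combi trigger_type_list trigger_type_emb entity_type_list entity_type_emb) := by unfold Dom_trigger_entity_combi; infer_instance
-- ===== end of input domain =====

-- B dedups in one backward pass over the zipped pairs with a seen-set (instead of the
-- tail-membership scan over two parallel lists) and builds both cartesian products together in one
-- fused double loop over the pair lists (alternative decomposition, same measured cost).

-- ===== PORT A =====
def trigger_entity_combi (trigger_type_list : List Int) (trigger_type_emb : List Int) (entity_type_list : List Int) (entity_type_emb : List Int) : (List (Int × Int)) × (List (Int × Int)) :=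
  let no_duplicate_emb : List Int → List Int → List Int × List Int := fun type_list type_emb =>
    (PySem.List.pyRange 0 type_list.length 1).foldl
      (fun (res : List Int × List Int) idx =>
        if (PySem.List.slice type_list (some (idx + 1)) none).contains (PySem.List.pyGetD type_list idx 0) then
          res
        else
          (res.1 ++ [PySem.List.pyGetD type_list idx 0], res.2 ++ [PySem.List.pyGetD type_emb idx 0]))
      ([], [])
  let tt := no_duplicate_emb trigger_type_list trigger_type_emb
  let et := no_duplicate_emb entity_type_list entity_type_emb
  (et.1.flatMap (fun e_type => tt.1.map (fun t_type => (t_type, e_type))),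
   et.2.flatMap (fun e_emb => tt.2.map (fun t_emb => (t_emb, e_emb))))

-- ===== PORT B =====
-- B-side helper: backward pass with a seen-set over the zipped pairs, then restore order
def tec_dedup_last (type_list : List Int) (type_emb : List Int) : List (Int × Int) :=
  let st := ((type_list.zip type_emb).reverse).foldl
    (fun (st : PySem.Set Int × List (Int × Int)) p =>
      if PySem.Set.contains st.1 p.1 then st
      else (PySem.Set.add st.1 p.1, st.2 ++ [p]))
    (PySem.Set.empty, [])
  st.2.reverse

def trigger_entity_combi_alt (trigger_type_list : List Int) (trigger_type_emb : List Int) (entity_type_list : List Int) (entity_type_emb : List Int) : (List (Int × Int)) × (List (Int × Int)) :=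
  let trig := tec_dedup_last trigger_type_list trigger_type_emb
  let ent := tec_dedup_last entity_type_list entity_type_emb
  ent.foldl
    (fun (acc : List (Int × Int) × List (Int × Int)) ep =>
      trig.foldl
        (fun (acc2 : List (Int × Int) × List (Int × Int)) tp =>
          (acc2.1 ++ [(tp.1, ep.1)], acc2.2 ++ [(tp.2, ep.2)]))
        acc)
    ([], [])

-- ===== PRECONDITION & SPEC =====
-- Pre_: each emb list is at least as long as its type list — otherwise A raises IndexError
-- (the last index of a nonempty type list is always kept and indexes the emb list).
def Pre_trigger_entity_combi (trigger_type_list : List Int) (trigger_type_emb : List Int) (entity_type_list : List Int) (entity_type_emb : List Int) : Prop :=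
  trigger_type_list.length ≤ trigger_type_emb.length ∧ entity_type_list.length ≤ entity_type_emb.length
instance (trigger_type_list : List Int) (trigger_type_emb : List Int) (entity_type_list : List Int) (entity_type_emb : List Int) : Decidable (Pre_trigger_entity_combi trigger_type_list trigger_type_emb entity_type_list entity_type_emb) := by unfold Pre_trigger_entity_combi; infer_instance
def pvWitness_trigger_entity_combi : List Int × List Int × List Int × List Int := ([1, 2, 1], [10, 20, 30], [5], [7])
def Spec_trigger_entity_combi (trigger_type_list : List Int) (trigger_type_emb : List Int) (entity_type_list : List Int) (entity_type_emb : List Int) (out : (List (Int × Int)) × (List (Int × Int))) : Prop := out = trigger_entity_combi_alt trigger_type_list trigger_type_emb entity_type_list entity_type_emb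
instance (trigger_type_list : List Int) (trigger_type_emb : List Int) (entity_type_list : List Int) (entity_type_emb : List Int) (out : (List (Int × Int)) × (List (Int × Int))) : Decidable (Spec_trigger_entity_combi trigger_type_list trigger_type_emb entity_type_list entity_type_emb out) := by unfold Spec_trigger_entity_combi; infer_instance

-- ===== CLAIM (what is proved, stated in full; the proofs are below) =====
def Claim_equal_trigger_entity_combi : Prop := ∀ (trigger_type_list : List Int) (trigger_type_emb : List Int) (entity_type_list : List Int) (entity_type_emb : List Int), Dom_trigger_entity_combi trigger_type_list trigger_type_emb entity_type_list entity_type_emb → Pre_trigger_entity_combi trigger_type_list trigger_type_emb entity_type_list entity_type_emb → Spec_trigger_entity_combi trigger_type_list trigger_type_emb entity_type_list entity_type_emb (trigger_entity_combi trigger_type_list trigger_type_emb entity_type_list entity_type_emb)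

-- ===== LEMMAS AND PROOFS =====

-- first-occurrence pass with an explicit seen list (models B's forward-in-reverse fold)
def pvFirstOcc (seen : List Int) : List (Int × Int) → List (Int × Int)
  | [] => []
  | p :: r => if p.1 ∈ seen then pvFirstOcc seen r else p :: pvFirstOcc (seen ++ [p.1]) r

-- last-occurrence filter (models A's "not in the tail" keep rule), with a seen set to make the induction go through
def pvLastOcc (seen : List Int) : List (Int × Int) → List (Int × Int)
  | [] => []
  | p :: r => if p.1 ∈ seen ∨ p.1 ∈ r.map Prod.fst then pvLastOcc seen r else p :: pvLastOcc seen r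

theorem pvFirstOcc_append (xs : List (Int × Int)) (seen : List Int) (p : Int × Int) :
    pvFirstOcc seen (xs ++ [p]) =
      pvFirstOcc seen xs ++ (if p.1 ∈ seen ∨ p.1 ∈ xs.map Prod.fst then [] else [p]) := by
  induction xs generalizing seen with
  | nil => simp [pvFirstOcc]
  | cons q qs ih =>
    by_cases hq : q.1 ∈ seen
    · simp only [List.cons_append, pvFirstOcc, if_pos hq, ih]
      congr 1
      refine if_congr ?_ rfl rfl
      by_cases hp : p.1 = q.1
      · simp [hp, hq]
      · simp [List.mem_cons, hp]
    · simp only [List.cons_append, pvFirstOcc, if_neg hq, ih]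
      congr 2
      refine if_congr ?_ rfl rfl
      constructor
      · rintro (hs | hs)
        · rcases List.mem_append.mp hs with h1 | h1
          · exact Or.inl h1
          · exact Or.inr (List.mem_cons.mpr (Or.inl (by simpa using h1)))
        · exact Or.inr (List.mem_cons.mpr (Or.inr hs))
      · rintro (hs | hs)
        · exact Or.inl (List.mem_append.mpr (Or.inl hs))
        · rcases List.mem_cons.mp hs with h1 | h1
          · exact Or.inl (List.mem_append.mpr (Or.inr (by simp [h1])))
          · exact Or.inr h1

theorem pvFirstOcc_reverse (l : List (Int × Int)) (seen : List Int) :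
    pvFirstOcc seen l.reverse = (pvLastOcc seen l).reverse := by
  induction l generalizing seen with
  | nil => simp [pvFirstOcc, pvLastOcc]
  | cons p r ih =>
    rw [List.reverse_cons, pvFirstOcc_append, ih]
    by_cases h : p.1 ∈ seen ∨ p.1 ∈ r.map Prod.fst
    · rw [if_pos (by simpa using h)]
      simp only [pvLastOcc, if_pos h]
      simp
    · rw [if_neg (by simpa using h)]
      simp only [pvLastOcc, if_neg h]
      simp

-- B's dedup fold over a pair list, characterized by pvFirstOcc
theorem pvBfold (l : List (Int × Int)) (S : PySem.Set Int) (a : List (Int × Int)) :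
    l.foldl
      (fun (st : PySem.Set Int × List (Int × Int)) p =>
        if PySem.Set.contains st.1 p.1 then st
        else (PySem.Set.add st.1 p.1, st.2 ++ [p]))
      (S, a)
    = (S ++ (pvFirstOcc S l).map Prod.fst, a ++ pvFirstOcc S l) := by
  induction l generalizing S a with
  | nil => simp [pvFirstOcc]
  | cons p r ih =>
    rw [List.foldl_cons]
    by_cases h : p.1 ∈ S
    · have hc : PySem.Set.contains S p.1 = true := by
        simp [PySem.Set.contains, h]
      rw [if_pos hc, ih, pvFirstOcc, if_pos h]
    · have hc : ¬ PySem.Set.contains S p.1 = true := by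
        simp [PySem.Set.contains, h]
      have hadd : PySem.Set.add S p.1 = S ++ [p.1] := by
        simp [PySem.Set.add, PySem.Set.contains, h]
      rw [if_neg hc]
      simp only [hadd, ih, pvFirstOcc, if_neg h]
      simp [List.append_assoc]

-- B's dedup helper computes exactly the last-occurrence sublist of the zip
theorem tec_dedup_last_eq (ts es : List Int) :
    tec_dedup_last ts es = pvLastOcc [] (ts.zip es) := by
  unfold tec_dedup_last
  rw [pvBfold ((ts.zip es).reverse) PySem.Set.empty []]
  have he : (PySem.Set.empty : PySem.Set Int) = ([] : List Int) := rfl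
  simp only [he]
  rw [pvFirstOcc_reverse]
  simp

-- A's index fold (in Nat-range form), characterized by pvLastOcc of the zip
theorem pvAfold (ts : List Int) (es : List Int) (h : ts.length ≤ es.length) (acc : List Int × List Int) :
    (List.range ts.length).foldl
      (fun (res : List Int × List Int) k =>
        if (ts.drop (k + 1)).contains (ts.getD k 0) then res
        else (res.1 ++ [ts.getD k 0], res.2 ++ [es.getD k 0]))
      acc
    = (acc.1 ++ (pvLastOcc [] (ts.zip es)).map Prod.fst,
       acc.2 ++ (pvLastOcc [] (ts.zip es)).map Prod.snd) := by
  induction ts generalizing es acc with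
  | nil => simp [pvLastOcc]
  | cons t ts' ih =>
    cases es with
    | nil => simp at h
    | cons e es' =>
      have h' : ts'.length ≤ es'.length := by simpa using h
      have hfst : (ts'.zip es').map Prod.fst = ts' := List.map_fst_zip h'
      rw [List.length_cons, List.range_succ_eq_map, List.foldl_cons, List.foldl_map]
      show (List.range ts'.length).foldl
          (fun (res : List Int × List Int) k =>
            if (ts'.drop (k + 1)).contains (ts'.getD k 0) then res
            else (res.1 ++ [ts'.getD k 0], res.2 ++ [es'.getD k 0]))
          (if ts'.contains t then acc else (acc.1 ++ [t], acc.2 ++ [e])) = _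
      by_cases hm : t ∈ ts'
      · rw [if_pos (by simpa using hm), ih es' h' acc]
        simp only [List.zip_cons_cons, pvLastOcc]
        rw [if_pos (by simp [hfst, hm])]
      · rw [if_neg (by simpa using hm), ih es' h' _]
        simp only [List.zip_cons_cons, pvLastOcc]
        rw [if_neg (by simp [hfst, hm])]
        simp [List.append_assoc]

-- A's dedup loop returns the two projections of the last-occurrence pair list
theorem pvADedup_eq (ts es : List Int) (h : ts.length ≤ es.length) :
    (PySem.List.pyRange 0 ts.length 1).foldl
      (fun (res : List Int × List Int) idx =>
        if (PySem.List.slice ts (some (idx + 1)) none).contains (PySem.List.pyGetD ts idx 0) then res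
        else (res.1 ++ [PySem.List.pyGetD ts idx 0], res.2 ++ [PySem.List.pyGetD es idx 0]))
      ([], [])
    = ((pvLastOcc [] (ts.zip es)).map Prod.fst, (pvLastOcc [] (ts.zip es)).map Prod.snd) := by
  have hrange : PySem.List.pyRange 0 (ts.length : Int) 1
      = (List.range ts.length).map (fun k => ((k : Nat) : Int)) := by
    rw [PySem.List.pyRange_one]
    simp
  have hstep : ∀ (res : List Int × List Int) (k : Nat),
      (if (PySem.List.slice ts (some ((k : Int) + 1)) none).contains (PySem.List.pyGetD ts (k : Int) 0) then res
       else (res.1 ++ [PySem.List.pyGetD ts (k : Int) 0], res.2 ++ [PySem.List.pyGetD es (k : Int) 0]))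
      = (if (ts.drop (k + 1)).contains (ts.getD k 0) then res
         else (res.1 ++ [ts.getD k 0], res.2 ++ [es.getD k 0])) := by
    intro res k
    have hc : ((k : Int) + 1) = ((k + 1 : Nat) : Int) := by push_cast; ring
    rw [hc, PySem.List.slice_from_natCast]
    simp [PySem.List.pyGetD_natCast]
  rw [hrange, List.foldl_map]
  simp only [hstep]
  rw [pvAfold ts es h ([], [])]
  simp

-- B's inner product fold over the trigger pairs
theorem pvProdInner (T : List (Int × Int)) (e1 e2 : Int) (a b : List (Int × Int)) :
    T.foldl
      (fun (acc2 : List (Int × Int) × List (Int × Int)) tp =>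
        (acc2.1 ++ [(tp.1, e1)], acc2.2 ++ [(tp.2, e2)]))
      (a, b)
    = (a ++ T.map (fun tp => (tp.1, e1)), b ++ T.map (fun tp => (tp.2, e2))) := by
  induction T generalizing a b with
  | nil => simp
  | cons q r ih => simp [ih, List.append_assoc]

-- B's fused double loop equals the two flatMap products
theorem pvProdOuter (E T : List (Int × Int)) (a b : List (Int × Int)) :
    E.foldl
      (fun (acc : List (Int × Int) × List (Int × Int)) ep =>
        T.foldl
          (fun (acc2 : List (Int × Int) × List (Int × Int)) tp =>
            (acc2.1 ++ [(tp.1, ep.1)], acc2.2 ++ [(tp.2, ep.2)]))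
          acc)
      (a, b)
    = (a ++ E.flatMap (fun ep => T.map (fun tp => (tp.1, ep.1))),
       b ++ E.flatMap (fun ep => T.map (fun tp => (tp.2, ep.2)))) := by
  induction E generalizing a b with
  | nil => simp
  | cons q r ih =>
    rw [List.foldl_cons, pvProdInner, ih]
    simp [List.append_assoc]

-- ===== VERDICT (by name: the statement is the Claim_ definition above) =====
theorem trigger_entity_combi_spec : Claim_equal_trigger_entity_combi := by
  intro tl te el ee _hdom hpre
  unfold Spec_trigger_entity_combi
  obtain ⟨h1, h2⟩ := hpre
  unfold trigger_entity_combi trigger_entity_combi_alt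
  simp only [pvADedup_eq tl te h1, pvADedup_eq el ee h2,
    tec_dedup_last_eq, pvProdOuter]
  simp [List.flatMap_map, List.map_map]
  exact ⟨rfl, rfl⟩
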